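-- pv_equiv track=rewrite | github.com/jandrovins/cp | CP/11231-Blackandwhitepainting/solution.py | chessNM
-- ===== SOURCE A (Python) =====
-- def chessM(m):
--     cont = 0
--     while m >= 8:
--         cont += 1
--         m -= 2
--     return cont
--
-- def chessNM(n, m):
--     cont = 0
--     while n >= 8 and m >= 8:
--         cont += chessM(n)
--         cont += chessM(m)
--         cont += 1
--         n -= 1
--         m -= 1
--     return cont
-- ===== SOURCE B (Python) =====
-- def chessNM(n, m):
--     # Closed form: the loop runs k = min(n, m) - 7 times; summing the per-step
--     # contributions (x - 6) // 2 telescopes via sum_{x=0..t} x//2 == t*t//4.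
--     k = min(n, m) - 7
--     if k <= 0:
--         return 0
--     a = n - 6
--     b = m - 6
--     return (a * a) // 4 - ((a - k) * (a - k)) // 4 \
--          + (b * b) // 4 - ((b - k) * (b - k)) // 4 + k
-- ===== Notes on version B (the rewrite author's own statement) =====
-- stated objective: faster
-- what changed: Replaced A's nested loops (outer loop over min(n,m)-7 steps, each calling the linear chessM twice) by an O(1) closed-form expression obtained by telescoping the summation sum x//2 = t*t//4.
import Mathlib
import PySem

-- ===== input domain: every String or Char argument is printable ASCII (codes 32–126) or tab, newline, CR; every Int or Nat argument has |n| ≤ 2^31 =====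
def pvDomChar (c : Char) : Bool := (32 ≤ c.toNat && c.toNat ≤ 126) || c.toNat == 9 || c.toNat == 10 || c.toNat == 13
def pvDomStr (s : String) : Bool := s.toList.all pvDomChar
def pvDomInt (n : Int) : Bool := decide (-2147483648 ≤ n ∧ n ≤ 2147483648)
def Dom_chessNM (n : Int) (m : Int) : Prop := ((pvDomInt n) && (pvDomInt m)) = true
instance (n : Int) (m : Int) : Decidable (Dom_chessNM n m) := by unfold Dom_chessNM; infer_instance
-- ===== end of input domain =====

-- B replaces A's O(min(n,m)·max(n,m)) nested loops by an O(1) closed-form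
-- telescoped summation (objective: faster, asymptotic).

-- ===== PORT A =====
-- while m >= 8: cont += 1; m -= 2
def chessMgo (m : Int) (cont : Int) : Int :=
  if m ≥ 8 then chessMgo (m - 2) (cont + 1) else cont
termination_by (m - 6).toNat
decreasing_by omega

def chessM (m : Int) : Int := chessMgo m 0

-- while n >= 8 and m >= 8: cont += chessM(n); cont += chessM(m); cont += 1; n -= 1; m -= 1
def chessNMgo (n : Int) (m : Int) (cont : Int) : Int :=
  if n ≥ 8 ∧ m ≥ 8 then chessNMgo (n - 1) (m - 1) (cont + chessM n + chessM m + 1) else cont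
termination_by (n - 7).toNat
decreasing_by omega

def chessNM (n : Int) (m : Int) : Int := chessNMgo n m 0

-- ===== PORT B =====
def chessNM_alt (n : Int) (m : Int) : Int :=
  let k := min n m - 7
  if k ≤ 0 then 0
  else
    let a := n - 6
    let b := m - 6
    PySem.Int.floordiv (a * a) 4 - PySem.Int.floordiv ((a - k) * (a - k)) 4
      + PySem.Int.floordiv (b * b) 4 - PySem.Int.floordiv ((b - k) * (b - k)) 4 + k

-- ===== PRECONDITION & SPEC =====
def Spec_chessNM (n : Int) (m : Int) (out : Int) : Prop := out = chessNM_alt n m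
instance (n : Int) (m : Int) (out : Int) : Decidable (Spec_chessNM n m out) := by unfold Spec_chessNM; infer_instance

-- ===== CLAIM (what is proved, stated in full; the proofs are below) =====
def Claim_equal_chessNM : Prop := ∀ (n : Int) (m : Int), Dom_chessNM n m → Spec_chessNM n m (chessNM n m)

-- ===== LEMMAS AND PROOFS =====

-- the inner loop: cont + (m-6)/2 when m ≥ 8
theorem chessMgo_eq (m cont : Int) :
    chessMgo m cont = if m ≥ 8 then cont + (m - 6) / 2 else cont := by
  by_cases h : m ≥ 8
  · rw [chessMgo]
    simp only [h, if_pos]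
    rw [chessMgo_eq (m - 2) (cont + 1)]
    by_cases h2 : m - 2 ≥ 8 <;> simp [h2] <;> omega
  · rw [chessMgo]; simp [h]
termination_by (m - 6).toNat
decreasing_by omega

theorem chessM_eq (m : Int) : chessM m = if m ≥ 8 then (m - 6) / 2 else 0 := by
  unfold chessM; rw [chessMgo_eq]; split <;> omega

-- closed form of chessNM_alt in terms of Lean's Int division
theorem chessNM_alt_eq (n m : Int) :
    chessNM_alt n m =
      if min n m - 7 ≤ 0 then 0
      else
        (n - 6) * (n - 6) / 4 - (n - 6 - (min n m - 7)) * (n - 6 - (min n m - 7)) / 4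
          + (m - 6) * (m - 6) / 4 - (m - 6 - (min n m - 7)) * (m - 6 - (min n m - 7)) / 4
          + (min n m - 7) := by
  have hf : ∀ a : Int, PySem.Int.floordiv a 4 = a / 4 :=
    fun a => PySem.Int.floordiv_eq_ediv_of_pos (a := a) (b := 4) (by norm_num)
  unfold chessNM_alt
  simp only [hf]

-- telescoping identity: floor(a²/4) - floor((a-1)²/4) = floor(a/2)  (for a ≥ 1)
theorem sq_div4_step (a : Int) (ha : 1 ≤ a) :
    a * a / 4 - (a - 1) * (a - 1) / 4 = a / 2 := by
  obtain ⟨q, hq⟩ : ∃ q : Int, a = 2 * q ∨ a = 2 * q + 1 := ⟨a / 2, by omega⟩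
  rcases hq with rfl | rfl
  · have e1 : (2 * q) * (2 * q) = 4 * (q * q) := by ring
    have e2 : (2 * q - 1) * (2 * q - 1) = 4 * (q * q - q) + 1 := by ring
    rw [e1, e2]; omega
  · have e1 : (2 * q + 1) * (2 * q + 1) = 4 * (q * q + q) + 1 := by ring
    have e2 : (2 * q + 1 - 1) * (2 * q + 1 - 1) = 4 * (q * q) := by ring
    rw [e1, e2]; omega

theorem chessNMgo_eq (n m cont : Int) :
    chessNMgo n m cont = cont + chessNM_alt n m := by
  rw [chessNMgo]
  by_cases h : n ≥ 8 ∧ m ≥ 8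
  · obtain ⟨hn, hm⟩ := h
    rw [if_pos ⟨hn, hm⟩, chessNMgo_eq (n - 1) (m - 1) _,
        chessM_eq, if_pos hn, chessM_eq, if_pos hm,
        chessNM_alt_eq n m, if_neg (show ¬ min n m - 7 ≤ 0 by omega),
        chessNM_alt_eq (n - 1) (m - 1)]
    have hsn := sq_div4_step (n - 6) (by omega)
    have hsm := sq_div4_step (m - 6) (by omega)
    by_cases hk : min n m - 7 ≤ 1
    · rw [if_pos (show min (n - 1) (m - 1) - 7 ≤ 0 by omega),
          show min n m - 7 = 1 by omega]
      omega
    · rw [if_neg (show ¬ min (n - 1) (m - 1) - 7 ≤ 0 by omega),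
          show min (n - 1) (m - 1) - 7 = min n m - 7 - 1 by omega,
          show n - 1 - 6 = n - 6 - 1 by ring, show m - 1 - 6 = m - 6 - 1 by ring,
          show n - 6 - 1 - (min n m - 7 - 1) = n - 6 - (min n m - 7) by ring,
          show m - 6 - 1 - (min n m - 7 - 1) = m - 6 - (min n m - 7) by ring]
      omega
  · rw [if_neg h, chessNM_alt_eq, if_pos (show min n m - 7 ≤ 0 by omega)]
    omega
termination_by (n - 7).toNat
decreasing_by omega

-- ===== VERDICT (by name: the statement is the Claim_ definition above) =====
theorem chessNM_spec : Claim_equal_chessNM := by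
  intro n m _
  unfold Spec_chessNM chessNM
  rw [chessNMgo_eq]
  omega
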